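-- pv_equiv track=rewrite | github.com/MerlinPCarson/Monopoles | unmonosat.py | verify_no_duplicates
-- ===== SOURCE A (Python) =====
-- def verify_no_duplicates(solution, num_monos):
--
--     for mono in range(1, num_monos+1):
--         mono_cnt = 0
--         for _, value in solution.items():
--             if value == mono:
--                 mono_cnt += 1
--                 if mono_cnt > 1:
--                     return False    # duplicate monopole found
--     # no duplicates found
--     return True
-- ===== SOURCE B (Python) =====
-- def verify_no_duplicates(solution, num_monos):
--     seen = set()
--     for value in solution.values():
--         if 1 <= value <= num_monos:
--             if value in seen:
--                 return False    # duplicate monopole found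
--             seen.add(value)
--     return True
-- ===== Notes on version B (the rewrite author's own statement) =====
-- stated objective: simpler
-- what changed: Replaced the nested scan (for each mono in 1..num_monos, count its occurrences over all solution values) by a single pass over solution.values() maintaining a set of in-range values already seen.
import Mathlib
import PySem

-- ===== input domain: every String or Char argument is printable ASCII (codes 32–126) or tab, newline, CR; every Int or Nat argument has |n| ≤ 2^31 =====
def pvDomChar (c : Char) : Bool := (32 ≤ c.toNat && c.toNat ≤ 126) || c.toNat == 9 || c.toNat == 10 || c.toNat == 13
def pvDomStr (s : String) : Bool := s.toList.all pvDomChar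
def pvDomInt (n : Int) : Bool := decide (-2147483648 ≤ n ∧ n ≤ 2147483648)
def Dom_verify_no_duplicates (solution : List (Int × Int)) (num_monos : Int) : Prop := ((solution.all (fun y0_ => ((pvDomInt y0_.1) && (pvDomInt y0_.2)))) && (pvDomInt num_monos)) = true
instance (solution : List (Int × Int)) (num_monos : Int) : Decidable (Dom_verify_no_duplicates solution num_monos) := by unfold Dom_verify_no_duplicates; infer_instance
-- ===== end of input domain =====

-- B replaces A's nested scan (each mono in 1..num_monos counted over all values) by one
-- pass over the values with a 'seen' set of in-range values (objective: simpler).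

-- ===== PORT A =====
-- inner loop: 'for _, value in solution.items(): …' with running mono_cnt and early return False
def vndInner (sol : List (Int × Int)) (mono : Int) (cnt : Int) : Bool :=
  match sol with
  | [] => true
  | (_, value) :: rest =>
      if value == mono then
        if cnt + 1 > 1 then false else vndInner rest mono (cnt + 1)
      else vndInner rest mono cnt

-- outer loop: 'for mono in range(1, num_monos+1): …' with early return False
def vndOuter (monos : List Int) (sol : List (Int × Int)) : Bool :=
  match monos with
  | [] => true
  | m :: rest => if vndInner sol m 0 then vndOuter rest sol else false

def verify_no_duplicates (solution : List (Int × Int)) (num_monos : Int) : Bool :=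
  vndOuter (PySem.List.pyRange 1 (num_monos + 1) 1) solution

-- ===== PORT B =====
-- single pass over the values, carrying the 'seen' set of in-range values
def vndScan (sol : List (Int × Int)) (num_monos : Int) (seen : PySem.Set Int) : Bool :=
  match sol with
  | [] => true
  | (_, value) :: rest =>
      if 1 ≤ value ∧ value ≤ num_monos then
        if PySem.Set.contains seen value then false
        else vndScan rest num_monos (PySem.Set.add seen value)
      else vndScan rest num_monos seen

def verify_no_duplicates_alt (solution : List (Int × Int)) (num_monos : Int) : Bool :=
  vndScan solution num_monos PySem.Set.empty

-- ===== PRECONDITION & SPEC =====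
def Spec_verify_no_duplicates (solution : List (Int × Int)) (num_monos : Int) (out : Bool) : Prop := out = verify_no_duplicates_alt solution num_monos
instance (solution : List (Int × Int)) (num_monos : Int) (out : Bool) : Decidable (Spec_verify_no_duplicates solution num_monos out) := by unfold Spec_verify_no_duplicates; infer_instance

-- ===== CLAIM (what is proved, stated in full; the proofs are below) =====
def Claim_equal_verify_no_duplicates : Prop := ∀ (solution : List (Int × Int)) (num_monos : Int), Dom_verify_no_duplicates solution num_monos → Spec_verify_no_duplicates solution num_monos (verify_no_duplicates solution num_monos)

-- ===== LEMMAS AND PROOFS =====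

-- the in-range values of the solution, in order
def vndVals (sol : List (Int × Int)) (n : Int) : List Int :=
  (sol.map Prod.snd).filter (fun v => decide (1 ≤ v) && decide (v ≤ n))

theorem vndInner_iff (sol : List (Int × Int)) (m cnt : Int) (h : cnt ≤ 1) :
    vndInner sol m cnt = true ↔ cnt + (sol.countP (fun p => p.2 == m) : Int) ≤ 1 := by
  induction sol generalizing cnt with
  | nil => simp [vndInner]; omega
  | cons p rest ih =>
      obtain ⟨k, v⟩ := p
      by_cases hv : v = m
      · simp only [vndInner, hv, List.countP_cons, beq_self_eq_true, if_pos]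
        split_ifs with hc
        · constructor
          · intro hcontra; exact absurd hcontra (by simp)
          · intro hle
            have : (0 : Int) ≤ (rest.countP (fun p => p.2 == m) : Int) := Int.natCast_nonneg _
            omega
        · rw [ih (cnt + 1) (by omega)]
          push_cast
          constructor <;> (intro; omega)
      · simp only [vndInner, List.countP_cons, beq_iff_eq, hv, ite_false]
        rw [ih cnt h]
        simp

theorem vndOuter_iff (monos : List Int) (sol : List (Int × Int)) :
    vndOuter monos sol = true ↔ ∀ m ∈ monos, vndInner sol m 0 = true := by
  induction monos with
  | nil => simp [vndOuter]
  | cons m rest ih =>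
      simp only [vndOuter, List.mem_cons]
      split_ifs with h
      · rw [ih]
        constructor
        · rintro hall x (rfl | hx)
          · exact h
          · exact hall x hx
        · intro hall x hx; exact hall x (Or.inr hx)
      · constructor
        · intro hcontra; exact absurd hcontra (by simp)
        · intro hall; exact absurd (hall m (Or.inl rfl)) h

theorem portA_iff (sol : List (Int × Int)) (n : Int) :
    verify_no_duplicates sol n = true ↔
      ∀ m : Int, 1 ≤ m → m ≤ n → (sol.countP (fun p => p.2 == m) : Int) ≤ 1 := by
  unfold verify_no_duplicates
  rw [vndOuter_iff]
  constructor
  · intro h m h1 h2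
    have hm : m ∈ PySem.List.pyRange 1 (n + 1) 1 := by
      rw [PySem.List.mem_pyRange_one]; omega
    have := (vndInner_iff sol m 0 (by omega)).1 (h m hm)
    omega
  · intro h m hm
    rw [PySem.List.mem_pyRange_one] at hm
    rw [vndInner_iff sol m 0 (by omega)]
    have := h m hm.1 (by omega)
    omega

theorem vndScan_iff (sol : List (Int × Int)) (n : Int) (seen : PySem.Set Int) :
    vndScan sol n seen = true ↔
      (vndVals sol n).Nodup ∧ ∀ v ∈ vndVals sol n, v ∉ seen := by
  induction sol generalizing seen with
  | nil => simp [vndScan, vndVals]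
  | cons p rest ih =>
      obtain ⟨k, v⟩ := p
      by_cases hr : 1 ≤ v ∧ v ≤ n
      · have hcons : vndVals ((k, v) :: rest) n = v :: vndVals rest n := by
          simp [vndVals, hr.1, hr.2]
        simp only [vndScan]
        rw [if_pos hr, hcons]
        by_cases hseen : PySem.Set.contains seen v = true
        · rw [if_pos hseen]
          rw [PySem.Set.contains_iff] at hseen
          constructor
          · intro hcontra; exact absurd hcontra (by simp)
          · rintro ⟨-, hnot⟩
            exact absurd hseen (hnot v (List.mem_cons_self ..))
        · rw [if_neg hseen, ih]
          rw [PySem.Set.contains_iff] at hseen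
          simp only [List.nodup_cons, List.mem_cons, forall_eq_or_imp]
          constructor
          · rintro ⟨hnd, hmem⟩
            refine ⟨⟨fun hv => (hmem v hv) (by rw [PySem.Set.mem_add]; right; rfl), hnd⟩,
                    hseen, fun u hu hcontra => (hmem u hu) (by rw [PySem.Set.mem_add]; left; exact hcontra)⟩
          · rintro ⟨⟨hvnot, hnd⟩, -, hmem⟩
            refine ⟨hnd, fun u hu hcontra => ?_⟩
            rw [PySem.Set.mem_add] at hcontra
            rcases hcontra with h1 | h2
            · exact (hmem u hu) h1
            · exact hvnot (h2 ▸ hu)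
      · have hcons : vndVals ((k, v) :: rest) n = vndVals rest n := by
          simp only [vndVals, List.map_cons, List.filter_cons]
          rw [if_neg]; simp only [Bool.and_eq_true, decide_eq_true_eq]; omega
        simp only [vndScan]
        rw [if_neg hr, hcons]
        exact ih seen

theorem portB_iff (sol : List (Int × Int)) (n : Int) :
    verify_no_duplicates_alt sol n = true ↔ (vndVals sol n).Nodup := by
  unfold verify_no_duplicates_alt
  rw [vndScan_iff]
  simp [PySem.Set.empty]

theorem nodup_vals_iff (sol : List (Int × Int)) (n : Int) :
    (vndVals sol n).Nodup ↔
      ∀ m : Int, 1 ≤ m → m ≤ n → (sol.countP (fun p => p.2 == m) : Int) ≤ 1 := by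
  rw [List.nodup_iff_count_le_one]
  constructor
  · intro h m h1 h2
    have := h m
    have hc : (vndVals sol n).count m = (sol.map Prod.snd).count m := by
      unfold vndVals
      rw [List.count_filter]
      simp [h1, h2]
    rw [hc] at this
    rw [List.count_eq_countP, List.countP_map] at this
    have : sol.countP ((fun v => v == m) ∘ Prod.snd) ≤ 1 := this
    simpa [Function.comp] using (Int.ofNat_le.mpr this)
  · intro h m
    by_cases hr : 1 ≤ m ∧ m ≤ n
    · have := h m hr.1 hr.2
      have hc : (vndVals sol n).count m = (sol.map Prod.snd).count m := by
        unfold vndVals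
        rw [List.count_filter]
        simp [hr.1, hr.2]
      rw [hc, List.count_eq_countP, List.countP_map]
      have h2 : ((sol.countP ((fun v => v == m) ∘ Prod.snd)) : Int) ≤ 1 := by
        simpa [Function.comp] using this
      exact_mod_cast h2
    · have hnot : m ∉ vndVals sol n := by
        unfold vndVals
        intro hmem
        rw [List.mem_filter] at hmem
        simp only [Bool.and_eq_true, decide_eq_true_eq] at hmem
        exact hr ⟨hmem.2.1, hmem.2.2⟩
      rw [List.count_eq_zero_of_not_mem hnot]
      omega

-- ===== VERDICT (by name: the statement is the Claim_ definition above) =====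
theorem verify_no_duplicates_spec : Claim_equal_verify_no_duplicates := by
  intro solution num_monos _
  unfold Spec_verify_no_duplicates
  rw [Bool.eq_iff_iff, portA_iff, portB_iff, nodup_vals_iff]
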